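-- pv_equiv track=rewrite | github.com/bpaduru/cs5100-gesture-hmm | demo.py | bfs_next
-- ===== SOURCE A (Python) =====
-- COLS = 19
--
-- ROWS = 15
--
-- MAZE = [
--     [1,1,1,1,1,1,1,1,1,1,1,1,1,1,1,1,1,1,1],
--     [1,0,0,0,0,0,0,0,0,1,0,0,0,0,0,0,0,0,1],
--     [1,0,1,1,0,1,1,1,0,1,0,1,1,1,0,1,1,0,1],
--     [1,0,1,1,0,1,1,1,0,1,0,1,1,1,0,1,1,0,1],
--     [1,0,0,0,0,0,0,0,0,0,0,0,0,0,0,0,0,0,1],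
--     [1,0,1,1,0,1,0,1,1,1,1,1,0,1,0,1,1,0,1],
--     [1,0,0,0,0,1,0,0,0,1,0,0,0,1,0,0,0,0,1],
--     [1,1,1,1,0,1,1,1,0,0,0,1,1,1,0,1,1,1,1],
--     [1,0,0,0,0,1,0,0,0,0,0,0,0,1,0,0,0,0,1],
--     [1,0,1,1,0,1,0,1,1,1,1,1,0,1,0,1,1,0,1],
--     [1,0,0,0,0,0,0,0,0,1,0,0,0,0,0,0,0,0,1],
--     [1,0,1,0,1,1,1,0,0,1,0,0,1,1,1,0,1,0,1],
--     [1,0,1,0,0,0,0,0,1,1,1,0,0,0,0,0,1,0,1],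
--     [1,0,0,0,1,0,0,0,0,0,0,0,0,0,1,0,0,0,1],
--     [1,1,1,1,1,1,1,1,1,1,1,1,1,1,1,1,1,1,1],
-- ]
--
-- def is_wall(r, c):
--     if r < 0 or r >= ROWS or c < 0 or c >= COLS:
--         return True
--     return MAZE[r][c] == 1
--
-- def bfs_next(ghost_pos, target_pos):
--     # breadth-first search - finds shortest path through maze for ghost AI
--     if ghost_pos == target_pos:
--         return ghost_pos
--     from collections import deque as dq
--     queue   = dq([(ghost_pos, [])])
--     visited = {ghost_pos}
--     while queue:
--         pos, path = queue.popleft()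
--         r, c = pos
--         for dr, dc in [(-1,0),(1,0),(0,-1),(0,1)]:
--             npos = (r+dr, c+dc)
--             if not is_wall(*npos) and npos not in visited:
--                 new_path = path + [npos]
--                 if npos == target_pos:
--                     return new_path[0] if new_path else ghost_pos
--                 visited.add(npos)
--                 queue.append((npos, new_path))
--     return ghost_pos
-- ===== SOURCE B (Python) =====
-- # Maze stored as wall-strings; BFS over an index-cursor list whose entries carry
-- # only the FIRST STEP from the ghost (no deque, no per-entry path copies).
-- MAZE_S = [
--     "###################",
--     "#        #        #",
--     "# ## ### # ### ## #",
--     "# ## ### # ### ## #",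
--     "#                 #",
--     "# ## # ##### # ## #",
--     "#    #   #   #    #",
--     "#### ###   ### ####",
--     "#    #       #    #",
--     "# ## # ##### # ## #",
--     "#        #        #",
--     "# # ###  #  ### # #",
--     "# #     ###     # #",
--     "#   #         #   #",
--     "###################",
-- ]
--
-- def bfs_next(ghost_pos, target_pos):
--     # BFS: scan a growing visit-order list with a cursor instead of popping a deque
--     if ghost_pos == target_pos:
--         return ghost_pos
--     tgt = tuple(target_pos)
--     start = (ghost_pos[0], ghost_pos[1])
--     order = [(start, None)]
--     seen = {start}
--     i = 0
--     while i < len(order):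
--         (r, c), first = order[i]
--         i += 1
--         for n in ((r - 1, c), (r + 1, c), (r, c - 1), (r, c + 1)):
--             if 0 <= n[0] < 15 and 0 <= n[1] < 19 and MAZE_S[n[0]][n[1]] != '#' and n not in seen:
--                 step = n if first is None else first
--                 if n == tgt:
--                     return step
--                 seen.add(n)
--                 order.append((n, step))
--     return ghost_pos
-- ===== Notes on version B (the rewrite author's own statement) =====
-- stated objective: alternative
-- what changed: BFS is redone over an index-cursor visit list whose entries carry only the first step from the ghost (no deque and no per-enqueue copy of a growing path list), with the maze stored as wall-strings and the bounds check inlined instead of an is_wall helper.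
import Mathlib
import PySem

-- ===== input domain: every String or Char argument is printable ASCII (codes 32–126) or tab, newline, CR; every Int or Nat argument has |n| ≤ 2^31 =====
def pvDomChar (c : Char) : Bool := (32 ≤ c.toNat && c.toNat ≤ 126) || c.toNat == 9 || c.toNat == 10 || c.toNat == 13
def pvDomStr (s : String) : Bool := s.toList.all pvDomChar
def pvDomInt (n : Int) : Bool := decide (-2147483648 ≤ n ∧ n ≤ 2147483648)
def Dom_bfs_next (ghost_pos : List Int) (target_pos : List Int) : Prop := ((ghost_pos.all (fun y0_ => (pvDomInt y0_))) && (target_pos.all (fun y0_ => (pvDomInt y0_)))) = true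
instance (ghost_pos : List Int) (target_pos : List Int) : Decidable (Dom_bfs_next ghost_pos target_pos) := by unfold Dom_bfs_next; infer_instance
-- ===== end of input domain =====

-- B replaces A's deque of (cell, full copied path) by an index-cursor visit list whose
-- entries carry only the first step from the ghost, over a wall-string maze (objective: alternative).

-- ===== PORT A =====
def pvMAZE : List (List Int) :=
  [[1,1,1,1,1,1,1,1,1,1,1,1,1,1,1,1,1,1,1],
   [1,0,0,0,0,0,0,0,0,1,0,0,0,0,0,0,0,0,1],
   [1,0,1,1,0,1,1,1,0,1,0,1,1,1,0,1,1,0,1],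
   [1,0,1,1,0,1,1,1,0,1,0,1,1,1,0,1,1,0,1],
   [1,0,0,0,0,0,0,0,0,0,0,0,0,0,0,0,0,0,1],
   [1,0,1,1,0,1,0,1,1,1,1,1,0,1,0,1,1,0,1],
   [1,0,0,0,0,1,0,0,0,1,0,0,0,1,0,0,0,0,1],
   [1,1,1,1,0,1,1,1,0,0,0,1,1,1,0,1,1,1,1],
   [1,0,0,0,0,1,0,0,0,0,0,0,0,1,0,0,0,0,1],
   [1,0,1,1,0,1,0,1,1,1,1,1,0,1,0,1,1,0,1],
   [1,0,0,0,0,0,0,0,0,1,0,0,0,0,0,0,0,0,1],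
   [1,0,1,0,1,1,1,0,0,1,0,0,1,1,1,0,1,0,1],
   [1,0,1,0,0,0,0,0,1,1,1,0,0,0,0,0,1,0,1],
   [1,0,0,0,1,0,0,0,0,0,0,0,0,0,1,0,0,0,1],
   [1,1,1,1,1,1,1,1,1,1,1,1,1,1,1,1,1,1,1]]

-- module helper is_wall (the maze indexing is in range whenever that branch is reached)
def pvIsWall (r c : Int) : Bool :=
  if r < 0 || 15 ≤ r || c < 0 || 19 ≤ c then true
  else (PySem.List.pyGet? ((PySem.List.pyGet? pvMAZE r).getD []) c).getD 0 == 1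

def pvDirs : List (Int × Int) := [(-1,0),(1,0),(0,-1),(0,1)]

-- inner 'for dr, dc in …' of A: returns an early answer or the updated (queue, visited)
def pvProcA (ghost pos : Int × Int) (target : List Int) (path : List (Int × Int)) :
    List (Int × Int) → List ((Int × Int) × List (Int × Int)) → List (Int × Int) →
    Sum (Int × Int) (List ((Int × Int) × List (Int × Int)) × List (Int × Int))
  | [], q, vis => .inr (q, vis)
  | d :: ds, q, vis =>
    let npos := (pos.1 + d.1, pos.2 + d.2)
    if !pvIsWall npos.1 npos.2 && !(vis.contains npos) then
      let newPath := path ++ [npos]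
      if [npos.1, npos.2] == target then
        .inl (match newPath with | [] => ghost | h :: _ => h)   -- new_path[0] if new_path else ghost_pos
      else
        pvProcA ghost pos target path ds (q ++ [(npos, newPath)]) (vis ++ [npos])
    else pvProcA ghost pos target path ds q vis

-- while queue: …  (fuel is a totality guard only; one unit per dequeue, and the queue
-- receives at most one entry per open maze cell, far below 1000)
def pvBfsA (ghost : Int × Int) (target : List Int) :
    Nat → List ((Int × Int) × List (Int × Int)) → List (Int × Int) → Int × Int
  | 0, _, _ => ghost
  | _ + 1, [], _ => ghost
  | fuel + 1, (pos, path) :: qs, vis =>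
    match pvProcA ghost pos target path pvDirs qs vis with
    | .inl ans => ans
    | .inr (q', vis') => pvBfsA ghost target fuel q' vis'

def bfs_next (ghost_pos : List Int) (target_pos : List Int) : List Int :=
  if ghost_pos == target_pos then ghost_pos
  else match ghost_pos with
    | [r, c] =>
      let ans := pvBfsA (r, c) target_pos 1000 [((r, c), [])] [(r, c)]
      [ans.1, ans.2]
    | _ => ghost_pos   -- Python A raises ValueError here (tuple unpack); outside Pre_

-- ===== PORT B =====
-- B's maze: one wall-string per row, '#' = wall
def pvRowsB : List String :=
  ["###################",
   "#        #        #",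
   "# ## ### # ### ## #",
   "# ## ### # ### ## #",
   "#                 #",
   "# ## # ##### # ## #",
   "#    #   #   #    #",
   "#### ###   ### ####",
   "#    #       #    #",
   "# ## # ##### # ## #",
   "#        #        #",
   "# # ###  #  ### # #",
   "# #     ###     # #",
   "#   #         #   #",
   "###################"]

-- the guard '0 <= n[0] < 15 and 0 <= n[1] < 19 and MAZE_S[n[0]][n[1]] != '#''
-- (string indexing only reached when in range, so the getD defaults are never used)
def pvOpenB (r c : Int) : Bool :=
  0 ≤ r && r < 15 && 0 ≤ c && c < 19 &&
    ((PySem.Str.pyGet? ((PySem.List.pyGet? pvRowsB r).getD "") c).getD '#' != '#')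

-- inner 'for n in ((r-1,c),(r+1,c),(r,c-1),(r,c+1))': early answer or updated (order, seen)
def pvScanB (first0 : Option (Int × Int)) (tgt : List Int) :
    List (Int × Int) → List ((Int × Int) × Option (Int × Int)) → List (Int × Int) →
    Sum (Int × Int) (List ((Int × Int) × Option (Int × Int)) × List (Int × Int))
  | [], ord, seen => .inr (ord, seen)
  | n :: ns, ord, seen =>
    if pvOpenB n.1 n.2 && !(seen.contains n) then
      let step := first0.getD n           -- n if first is None else first
      if [n.1, n.2] == tgt then .inl step
      else pvScanB first0 tgt ns (ord ++ [(n, some step)]) (seen ++ [n])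
    else pvScanB first0 tgt ns ord seen

-- while i < len(order): …  (fuel = totality guard, one unit per cursor step;
-- none = the loop ran off the list without meeting the target)
def pvLoopB (tgt : List Int) :
    Nat → List ((Int × Int) × Option (Int × Int)) → Nat → List (Int × Int) → Option (Int × Int)
  | 0, _, _, _ => none
  | fuel + 1, ord, i, seen =>
    match ord[i]? with
    | none => none
    | some ((r, c), first0) =>
      match pvScanB first0 tgt [(r - 1, c), (r + 1, c), (r, c - 1), (r, c + 1)] ord seen with
      | .inl ans => some ans
      | .inr (ord', seen') => pvLoopB tgt fuel ord' (i + 1) seen'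

def bfs_next_alt (ghost_pos : List Int) (target_pos : List Int) : List Int :=
  if ghost_pos == target_pos then ghost_pos
  else
    -- start = (ghost_pos[0], ghost_pos[1]); Pre_ guarantees both indices exist
    let r := (PySem.List.pyGet? ghost_pos 0).getD 0
    let c := (PySem.List.pyGet? ghost_pos 1).getD 0
    match pvLoopB target_pos 1000 [((r, c), none)] 0 [(r, c)] with
    | some s => [s.1, s.2]
    | none => ghost_pos     -- final 'return ghost_pos'

-- ===== PRECONDITION & SPEC =====
-- Pre_ excludes only inputs where A raises: ghost_pos ≠ target_pos with ghost_pos not of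
-- length 2 (the tuple unpacking 'r, c = pos' raises ValueError there).
def Pre_bfs_next (ghost_pos : List Int) (target_pos : List Int) : Prop :=
  ghost_pos = target_pos ∨ ghost_pos.length = 2
instance (ghost_pos : List Int) (target_pos : List Int) : Decidable (Pre_bfs_next ghost_pos target_pos) := by unfold Pre_bfs_next; infer_instance
def pvWitness_bfs_next : List Int × List Int := ([1, 1], [1, 3])

def Spec_bfs_next (ghost_pos : List Int) (target_pos : List Int) (out : List Int) : Prop := out = bfs_next_alt ghost_pos target_pos
instance (ghost_pos : List Int) (target_pos : List Int) (out : List Int) : Decidable (Spec_bfs_next ghost_pos target_pos out) := by unfold Spec_bfs_next; infer_instance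

-- ===== CLAIM (what is proved, stated in full; the proofs are below) =====
def Claim_equal_bfs_next : Prop := ∀ (ghost_pos : List Int) (target_pos : List Int), Dom_bfs_next ghost_pos target_pos → Pre_bfs_next ghost_pos target_pos → Spec_bfs_next ghost_pos target_pos (bfs_next ghost_pos target_pos)

-- ===== LEMMAS AND PROOFS =====

-- the two maze representations agree on every cell
theorem pvOpen_eq_not_wall (r c : Int) : pvOpenB r c = !pvIsWall r c := by
  unfold pvOpenB pvIsWall
  by_cases hr0 : 0 ≤ r
  · by_cases hr1 : r < 15
    · by_cases hc0 : 0 ≤ c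
      · by_cases hc1 : c < 19
        · obtain ⟨m, rfl⟩ := Int.eq_ofNat_of_zero_le hr0
          obtain ⟨k, rfl⟩ := Int.eq_ofNat_of_zero_le hc0
          have hm : m < 15 := by exact_mod_cast hr1
          have hk : k < 19 := by exact_mod_cast hc1
          interval_cases m <;> interval_cases k <;> decide
        · simp [hc1, show (19:Int) ≤ c from le_of_not_gt hc1]
      · simp [hc0, show c < 0 from lt_of_not_ge hc0]
    · simp [hr1, show (15:Int) ≤ r from le_of_not_gt hr1]
  · simp [hr0, show r < 0 from lt_of_not_ge hr0]

theorem pvForall₂_append {α β : Type} {R : α → β → Prop} :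
    ∀ {l₁ : List α} {l₂ : List β} {u₁ : List α} {u₂ : List β},
    List.Forall₂ R l₁ l₂ → List.Forall₂ R u₁ u₂ → List.Forall₂ R (l₁ ++ u₁) (l₂ ++ u₂) := by
  intro l₁ l₂ u₁ u₂ h hu
  induction h with
  | nil => simpa using hu
  | cons hx _ ih => exact List.forall₂_cons.mpr ⟨hx, ih⟩

-- relation between an A queue entry and a B visit-list entry: same cell, and B's
-- stored first step is the head of A's stored path
def pvRel (a : (Int × Int) × List (Int × Int)) (b : (Int × Int) × Option (Int × Int)) : Prop :=
  b.1 = a.1 ∧ b.2 = a.2.head?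

theorem pvScan_eq (ghost pos : Int × Int) (target : List Int) (path : List (Int × Int)) :
    ∀ (ds : List (Int × Int)) (q : List ((Int × Int) × List (Int × Int)))
      (ord : List ((Int × Int) × Option (Int × Int))) (vis : List (Int × Int)),
    (∃ x, pvProcA ghost pos target path ds q vis = .inl x ∧
          pvScanB path.head? target (ds.map fun d => (pos.1 + d.1, pos.2 + d.2)) ord vis = .inl x) ∨
    (∃ NA NB vis', pvProcA ghost pos target path ds q vis = .inr (q ++ NA, vis') ∧
          pvScanB path.head? target (ds.map fun d => (pos.1 + d.1, pos.2 + d.2)) ord vis = .inr (ord ++ NB, vis') ∧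
          List.Forall₂ pvRel NA NB) := by
  intro ds
  induction ds with
  | nil => intro q ord vis; exact .inr ⟨[], [], vis, by simp [pvProcA], by simp [pvScanB]⟩
  | cons d ds ih =>
    intro q ord vis
    simp only [List.map_cons, pvProcA, pvScanB, pvOpen_eq_not_wall]
    by_cases hw : (!pvIsWall (pos.1 + d.1) (pos.2 + d.2) &&
        !(vis.contains (pos.1 + d.1, pos.2 + d.2))) = true
    · simp only [hw, if_true]
      by_cases ht : ([(pos.1 + d.1), (pos.2 + d.2)] == target) = true
      · simp only [ht, if_true]
        exact .inl ⟨path.headD (pos.1 + d.1, pos.2 + d.2),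
          by cases path <;> rfl, by cases path <;> rfl⟩
      · simp only [ht]
        have hstep : path.head?.getD (pos.1 + d.1, pos.2 + d.2) =
            (path ++ [(pos.1 + d.1, pos.2 + d.2)]).headD (pos.1 + d.1, pos.2 + d.2) := by
          cases path <;> rfl
        rcases ih (q ++ [((pos.1 + d.1, pos.2 + d.2), path ++ [(pos.1 + d.1, pos.2 + d.2)])])
            (ord ++ [((pos.1 + d.1, pos.2 + d.2), some (path.head?.getD (pos.1 + d.1, pos.2 + d.2)))])
            (vis ++ [(pos.1 + d.1, pos.2 + d.2)]) with
          ⟨x, hA, hB⟩ | ⟨NA, NB, vis', hA, hB, hrel⟩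
        · exact .inl ⟨x, hA, hB⟩
        · refine .inr ⟨((pos.1 + d.1, pos.2 + d.2), path ++ [(pos.1 + d.1, pos.2 + d.2)]) :: NA,
            ((pos.1 + d.1, pos.2 + d.2), some (path.head?.getD (pos.1 + d.1, pos.2 + d.2))) :: NB,
            vis', by simpa using hA, by simpa using hB, ?_⟩
          exact List.forall₂_cons.mpr ⟨⟨rfl, by cases path <;> rfl⟩, hrel⟩
    · simp only [hw]
      exact ih q ord vis

theorem pvLoop_eq (ghost : Int × Int) (target : List Int) :
    ∀ (fuel : Nat) (q : List ((Int × Int) × List (Int × Int)))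
      (ord : List ((Int × Int) × Option (Int × Int))) (i : Nat) (vis : List (Int × Int)),
    List.Forall₂ pvRel q (ord.drop i) →
    pvBfsA ghost target fuel q vis = (pvLoopB target fuel ord i vis).getD ghost := by
  intro fuel
  induction fuel with
  | zero => intro q ord i vis _; rfl
  | succ fuel ih =>
    intro q ord i vis h
    by_cases hi : i < ord.length
    · have hdrop : ord.drop i = ord[i] :: ord.drop (i + 1) := List.drop_eq_getElem_cons hi
      rw [hdrop, List.forall₂_cons_right_iff] at h
      obtain ⟨⟨⟨r0, c0⟩, path⟩, q1t, hab, htail, rfl⟩ := h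
      · obtain ⟨hb1, hb2⟩ := hab
        have hord : ord[i] = ((r0, c0), path.head?) := Prod.ext hb1 hb2
        have hsome : ord[i]? = some ((r0, c0), path.head?) := by
          rw [List.getElem?_eq_getElem hi, hord]
        simp only [pvBfsA, pvLoopB, hsome]
        have hmap : [((r0:Int) - 1, c0), (r0 + 1, c0), (r0, c0 - 1), (r0, c0 + 1)] =
            pvDirs.map fun d => (r0 + d.1, c0 + d.2) := by
          simp [pvDirs]; constructor <;> ring
        rw [hmap]
        rcases pvScan_eq ghost (r0, c0) target path pvDirs q1t ord vis with
          ⟨x, hA, hB⟩ | ⟨NA, NB, vis', hA, hB, hrel⟩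
        · rw [hA, hB]; rfl
        · rw [hA, hB]
          apply ih
          rw [List.drop_append_of_le_length (by omega)]
          exact pvForall₂_append htail hrel
    · have hnone : ord[i]? = none := List.getElem?_eq_none (le_of_not_gt hi)
      have hdrop : ord.drop i = [] := List.drop_eq_nil_of_le (le_of_not_gt hi)
      rw [hdrop] at h
      cases h
      simp only [pvBfsA, pvLoopB, hnone, Option.getD_none]

theorem bfs_next_eq_alt (ghost_pos target_pos : List Int)
    (hpre : Pre_bfs_next ghost_pos target_pos) :
    bfs_next ghost_pos target_pos = bfs_next_alt ghost_pos target_pos := by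
  unfold bfs_next bfs_next_alt
  by_cases he : (ghost_pos == target_pos) = true
  · simp [he]
  · simp only [he]
    rcases hpre with h | h
    · exact absurd (by simp [h]) he
    · match ghost_pos, h with
      | [r, c], _ =>
        have heq := pvLoop_eq (r, c) target_pos 1000 [((r, c), [])] [((r, c), none)] 0 [(r, c)]
          (List.forall₂_cons.mpr ⟨⟨rfl, rfl⟩, List.Forall₂.nil⟩)
        have h0 : (PySem.List.pyGet? [r, c] 0).getD 0 = r := rfl
        have h1 : (PySem.List.pyGet? [r, c] 1).getD 0 = c := rfl
        simp only [h0, h1, heq]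
        cases pvLoopB target_pos 1000 [((r, c), none)] 0 [(r, c)] <;> rfl

-- ===== VERDICT (by name: the statement is the Claim_ definition above) =====
theorem bfs_next_spec : Claim_equal_bfs_next := by
  intro ghost_pos target_pos _ hpre
  unfold Spec_bfs_next
  exact bfs_next_eq_alt ghost_pos target_pos hpre
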